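-- pv_equiv track=rewrite | github.com/pypi-data/pypi-mirror-386 | packages/exonware-xwnode/exonware_xwnode-0.0.1.26-py3-none-any.whl/exonware/xwnode/common/monitoring/pattern_detector.py | _is_sequential_numeric_keys
-- ===== SOURCE A (Python) =====
-- from typing import Any, Dict, List, Optional, Set, Tuple, Union
--
-- def _is_sequential_numeric_keys(keys: List[Any]) -> bool:
--     """Check if keys are sequential numeric indices."""
--     if not keys:
--         return False
--
--     try:
--         # Convert to integers and check if sequential
--         int_keys = [int(k) for k in keys if str(k).isdigit()]
--         if len(int_keys) != len(keys):
--             return False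
--
--         int_keys.sort()
--         return int_keys == list(range(len(int_keys)))
--     except (ValueError, TypeError):
--         return False
-- ===== SOURCE B (Python) =====
-- def _is_sequential_numeric_keys(keys):
--     """Check if keys are sequential numeric indices."""
--     n = len(keys)
--     if n == 0:
--         return False
--     seen = [False] * n
--     try:
--         for k in keys:
--             if not str(k).isdigit():
--                 return False
--             v = int(k)
--             if v < 0 or v >= n or seen[v]:
--                 return False
--             seen[v] = True
--         return True
--     except (ValueError, TypeError):
--         return False
-- ===== Notes on version B (the rewrite author's own statement) =====
-- stated objective: alternative
-- what changed: Replaces A's filter-to-int-list, sort and compare-to-range(n) with a single early-exit pass that buckets each key's value into a presence array, rejecting non-digit keys, out-of-range values and duplicates on the spot.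
import Mathlib
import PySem

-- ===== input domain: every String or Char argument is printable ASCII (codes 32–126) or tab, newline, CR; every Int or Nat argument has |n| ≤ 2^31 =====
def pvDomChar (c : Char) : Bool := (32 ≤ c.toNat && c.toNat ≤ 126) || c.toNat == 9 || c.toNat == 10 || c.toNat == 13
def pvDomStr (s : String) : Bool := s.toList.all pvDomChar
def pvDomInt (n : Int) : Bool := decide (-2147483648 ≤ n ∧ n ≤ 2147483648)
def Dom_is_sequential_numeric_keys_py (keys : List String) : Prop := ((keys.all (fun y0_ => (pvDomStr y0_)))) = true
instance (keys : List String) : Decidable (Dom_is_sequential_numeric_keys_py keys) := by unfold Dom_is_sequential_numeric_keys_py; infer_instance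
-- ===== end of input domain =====

-- B replaces A's build-filter-sort-compare with a single early-exit pass marking a
-- presence array (objective: alternative — no sort, no intermediate lists).

-- ===== PORT A =====
-- A's comprehension [int(k) for k in keys if str(k).isdigit()]: the ints of the kept
-- keys; none = some int(k) raised ValueError (caught by A's except → False)
def pvIntList : List String → Option (List Int)
  | [] => some []
  | k :: rest =>
    match PySem.Int.ofStr? k, pvIntList rest with
    | some v, some vs => some (v :: vs)
    | _, _ => none

def is_sequential_numeric_keys_py (keys : List String) : Bool :=
  if keys = [] then false
  else
    match pvIntList (keys.filter (fun k => PySem.Str.strIsdigit k)) with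
    | none => false
    | some int_keys =>
      if ((int_keys.length : Int) ≠ (PySem.List.len keys)) then false
      else decide (PySem.List.sorted int_keys (fun x => x) false
                    = PySem.List.pyRange 0 (PySem.List.len int_keys) 1)

-- ===== PORT B =====
-- the for-loop of Source B: early exit on non-digit key, int() failure (ValueError),
-- out-of-range value or an already-seen bucket
def pvAltLoop (n : Int) (seen : List Bool) : List String → Bool
  | [] => true
  | k :: rest =>
    if ¬ PySem.Str.strIsdigit k then false
    else
      match PySem.Int.ofStr? k with
      | none => false
      | some v =>
        if v < 0 || n ≤ v || seen.getD v.toNat false then false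
        else pvAltLoop n (seen.set v.toNat true) rest

def is_sequential_numeric_keys_py_alt (keys : List String) : Bool :=
  let n : Int := PySem.List.len keys
  if n = 0 then false
  else pvAltLoop n (List.replicate keys.length false) keys

-- ===== PRECONDITION & SPEC =====
def Spec_is_sequential_numeric_keys_py (keys : List String) (out : Bool) : Prop := out = is_sequential_numeric_keys_py_alt keys
instance (keys : List String) (out : Bool) : Decidable (Spec_is_sequential_numeric_keys_py keys out) := by unfold Spec_is_sequential_numeric_keys_py; infer_instance

-- ===== CLAIM (what is proved, stated in full; the proofs are below) =====
def Claim_equal_is_sequential_numeric_keys_py : Prop := ∀ (keys : List String), Dom_is_sequential_numeric_keys_py keys → Spec_is_sequential_numeric_keys_py keys (is_sequential_numeric_keys_py keys)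

-- ===== LEMMAS AND PROOFS =====

theorem pvIntList_some_length (l : List String) (vs : List Int) (h : pvIntList l = some vs) :
    vs.length = l.length := by
  induction l generalizing vs with
  | nil => simp [pvIntList] at h; simp [← h]
  | cons k rest ih =>
    simp only [pvIntList] at h
    rcases hv : PySem.Int.ofStr? k with _ | v <;> rw [hv] at h
    · simp at h
    · rcases hr : pvIntList rest with _ | vs' <;> rw [hr] at h
      · simp at h
      · simp at h
        simp [← h, ih vs' hr]

theorem pvIntList_none (l : List String) (h : pvIntList l = none) :
    ∃ k ∈ l, PySem.Int.ofStr? k = none := by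
  induction l with
  | nil => simp [pvIntList] at h
  | cons k rest ih =>
    simp only [pvIntList] at h
    rcases hv : PySem.Int.ofStr? k with _ | v <;> rw [hv] at h
    · exact ⟨k, by simp, hv⟩
    · rcases hr : pvIntList rest with _ | vs' <;> rw [hr] at h
      · obtain ⟨k', hk', hv'⟩ := ih hr
        exact ⟨k', by simp [hk'], hv'⟩
      · simp at h

theorem pv_getD_set_ne (seen : List Bool) (i j : Nat) (h : j ≠ i) :
    (seen.set i true).getD j false = seen.getD j false := by
  simp [List.getD, List.getElem?_set_ne (Ne.symm h)]

theorem pv_getD_set_self (seen : List Bool) (i : Nat) (hi : i < seen.length) :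
    (seen.set i true).getD i false = true := by
  simp [List.getD, hi]

theorem pv_getD_replicate (m i : Nat) : (List.replicate m false).getD i false = false := by
  rw [List.getD, List.getElem?_replicate]; split <;> rfl

theorem pvAltLoop_bad (rest : List String) (n : Int) (seen : List Bool) (k : String)
    (hk : k ∈ rest)
    (hbad : PySem.Str.strIsdigit k = false ∨ PySem.Int.ofStr? k = none) :
    pvAltLoop n seen rest = false := by
  induction rest generalizing seen with
  | nil => cases hk
  | cons a rest ih =>
    simp only [pvAltLoop]
    by_cases hd : PySem.Str.strIsdigit a = true
    · rw [if_neg (not_not_intro hd)]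
      rcases hv : PySem.Int.ofStr? a with _ | v
      · rfl
      · show (if v < 0 || n ≤ v || seen.getD v.toNat false then false
              else pvAltLoop n (seen.set v.toNat true) rest) = false
        have hk' : k ∈ rest := by
          rcases List.mem_cons.mp hk with rfl | h
          · rcases hbad with hb | hb
            · rw [hb] at hd; exact absurd hd Bool.false_ne_true
            · rw [hb] at hv; cases hv
          · exact h
        by_cases hg : (v < 0 || n ≤ v || seen.getD v.toNat false) = true
        · rw [if_pos hg]
        · rw [if_neg hg]
          exact ih (seen.set v.toNat true) hk'
    · rw [if_pos hd]

theorem pvAltLoop_spec (rest : List String) (vs : List Int) (seen : List Bool) (n : Int)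
    (hmap : pvIntList rest = some vs)
    (hdig : ∀ k ∈ rest, PySem.Str.strIsdigit k = true)
    (hlen : (seen.length : Int) = n) :
    (pvAltLoop n seen rest = true ↔
      vs.Nodup ∧ ∀ v ∈ vs, 0 ≤ v ∧ v < n ∧ seen.getD v.toNat false = false) := by
  induction rest generalizing vs seen with
  | nil =>
    simp only [pvIntList, Option.some.injEq] at hmap
    subst hmap
    simp [pvAltLoop]
  | cons k rest ih =>
    simp only [pvIntList] at hmap
    rcases hv : PySem.Int.ofStr? k with _ | v <;> rw [hv] at hmap
    · cases hmap
    · rcases hr : pvIntList rest with _ | vs' <;> rw [hr] at hmap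
      · cases hmap
      · simp only [Option.some.injEq] at hmap
        subst hmap
        have hd : PySem.Str.strIsdigit k = true := hdig k (List.mem_cons_self ..)
        simp only [pvAltLoop]
        rw [if_neg (not_not_intro hd), hv]
        show (if v < 0 || n ≤ v || seen.getD v.toNat false then false
              else pvAltLoop n (seen.set v.toNat true) rest) = true ↔ _
        by_cases hg : (v < 0 || n ≤ v || seen.getD v.toNat false) = true
        · rw [if_pos hg]
          simp only [Bool.or_eq_true, decide_eq_true_eq] at hg
          constructor
          · intro h; exact absurd h Bool.false_ne_true
          · rintro ⟨-, hall⟩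
            obtain ⟨h0, hn, hs⟩ := hall v (List.mem_cons_self ..)
            rcases hg with (h | h) | h
            · omega
            · omega
            · exact absurd (hs.symm.trans h) Bool.false_ne_true
        · rw [if_neg hg]
          simp only [Bool.not_eq_true, Bool.or_eq_false_iff, decide_eq_false_iff_not] at hg
          obtain ⟨⟨h0, hn⟩, hs⟩ := hg
          have h0' : 0 ≤ v := not_lt.mp h0
          have hn' : v < n := not_le.mp hn
          have hvn : v.toNat < seen.length := by omega
          rw [ih vs' (seen.set v.toNat true) hr
              (fun a ha => hdig a (List.mem_cons_of_mem _ ha))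
              (by rw [List.length_set]; exact hlen)]
          constructor
          · rintro ⟨hnd, hall⟩
            have hvnot : v ∉ vs' := by
              intro hmem
              have h3 := (hall v hmem).2.2
              rw [pv_getD_set_self seen v.toNat hvn] at h3
              exact Bool.noConfusion h3
            refine ⟨List.nodup_cons.mpr ⟨hvnot, hnd⟩, fun w hw => ?_⟩
            rcases List.mem_cons.mp hw with rfl | hw'
            · exact ⟨h0', hn', hs⟩
            · obtain ⟨w0, wn, ws⟩ := hall w hw'
              have hne : w ≠ v := fun he => hvnot (he ▸ hw')
              have hne' : w.toNat ≠ v.toNat := by omega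
              rw [pv_getD_set_ne seen v.toNat w.toNat hne'] at ws
              exact ⟨w0, wn, ws⟩
          · rintro ⟨hnd, hall⟩
            have hvnot : v ∉ vs' := (List.nodup_cons.mp hnd).1
            refine ⟨(List.nodup_cons.mp hnd).2, fun w hw => ?_⟩
            obtain ⟨w0, wn, ws⟩ := hall w (List.mem_cons_of_mem _ hw)
            have hne : w ≠ v := fun he => hvnot (he ▸ hw)
            have hne' : w.toNat ≠ v.toNat := by omega
            rw [pv_getD_set_ne seen v.toNat w.toNat hne']
            exact ⟨w0, wn, ws⟩

theorem sorted_range_iff (vs : List Int) :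
    (PySem.List.sorted vs (fun x => x) false = PySem.List.pyRange 0 (vs.length : Int) 1) ↔
      vs.Nodup ∧ ∀ v ∈ vs, 0 ≤ v ∧ v < (vs.length : Int) := by
  constructor
  · intro h
    have hperm : (PySem.List.pyRange 0 (vs.length : Int) 1).Perm vs := by
      rw [← h]; exact PySem.List.sorted_perm vs (fun x => x) false
    refine ⟨hperm.nodup (PySem.List.nodup_pyRange_one 0 (vs.length : Int)), fun v hv => ?_⟩
    have hm : v ∈ PySem.List.pyRange 0 (vs.length : Int) 1 := hperm.mem_iff.mpr hv
    exact PySem.List.mem_pyRange_one.mp hm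
  · rintro ⟨hnd, hall⟩
    have hsub : vs ⊆ PySem.List.pyRange 0 (vs.length : Int) 1 := by
      intro v hv
      exact PySem.List.mem_pyRange_one.mpr (hall v hv)
    have hlen : (PySem.List.pyRange 0 (vs.length : Int) 1).length = vs.length := by
      rw [PySem.List.length_pyRange_one]; omega
    have hperm : vs.Perm (PySem.List.pyRange 0 (vs.length : Int) 1) :=
      (List.Nodup.subperm hnd hsub).perm_of_length_le (le_of_eq hlen)
    exact PySem.List.sorted_eq_of_perm_of_pairwise_lt vs _ (fun x => x) hperm.symm
      (PySem.List.pairwise_lt_pyRange_one 0 (vs.length : Int))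

-- ===== VERDICT (by name: the statement is the Claim_ definition above) =====
theorem is_sequential_numeric_keys_py_spec : Claim_equal_is_sequential_numeric_keys_py := by
  intro keys _
  unfold Spec_is_sequential_numeric_keys_py
  by_cases hnil : keys = []
  · subst hnil; rfl
  · have hlen0 : (PySem.List.len keys) ≠ 0 := by
      rw [PySem.List.len_eq]
      intro hc
      exact hnil (List.length_eq_zero_iff.mp (by exact_mod_cast hc))
    unfold is_sequential_numeric_keys_py is_sequential_numeric_keys_py_alt
    simp only [if_neg hnil, if_neg hlen0]
    by_cases hall : ∀ k ∈ keys, PySem.Str.strIsdigit k = true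
    · have hfilter : keys.filter (fun k => PySem.Str.strIsdigit k) = keys :=
        List.filter_eq_self.mpr (fun a ha => hall a ha)
      rw [hfilter]
      rcases h : pvIntList keys with _ | vs
      · -- some int(k) raises: A lands in the except → False; B's loop hits that key → False
        obtain ⟨k, hk, hv⟩ := pvIntList_none keys h
        rw [pvAltLoop_bad keys _ _ k hk (Or.inr hv)]
      · show (if ((vs.length : Int) ≠ (PySem.List.len keys)) then false
              else decide (PySem.List.sorted vs (fun x => x) false
                    = PySem.List.pyRange 0 (PySem.List.len vs) 1))
              = pvAltLoop (PySem.List.len keys) (List.replicate keys.length false) keys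
        have hvslen : vs.length = keys.length := pvIntList_some_length keys vs h
        have heq : ((vs.length : Int)) = PySem.List.len keys := by
          rw [PySem.List.len_eq, hvslen]
        rw [if_neg (not_ne_iff.mpr heq)]
        have hB := pvAltLoop_spec keys vs (List.replicate keys.length false)
          (PySem.List.len keys) h hall (by rw [List.length_replicate, PySem.List.len_eq])
        rw [Bool.eq_iff_iff, decide_eq_true_eq, hB, PySem.List.len_eq, PySem.List.len_eq,
            hvslen, ← hvslen, sorted_range_iff]
        constructor
        · rintro ⟨hnd, h2⟩
          exact ⟨hnd, fun v hv => ⟨(h2 v hv).1, (h2 v hv).2, pv_getD_replicate _ _⟩⟩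
        · rintro ⟨hnd, h2⟩
          exact ⟨hnd, fun v hv => ⟨(h2 v hv).1, (h2 v hv).2.1⟩⟩
    · push_neg at hall
      obtain ⟨k, hk, hnd⟩ := hall
      have hnd' : PySem.Str.strIsdigit k = false := Bool.eq_false_iff.mpr hnd
      rw [pvAltLoop_bad keys _ _ k hk (Or.inl hnd')]
      rcases h : pvIntList (keys.filter (fun k => PySem.Str.strIsdigit k)) with _ | vs
      · rfl
      · show (if ((vs.length : Int) ≠ (PySem.List.len keys)) then false
              else decide (PySem.List.sorted vs (fun x => x) false
                    = PySem.List.pyRange 0 (PySem.List.len vs) 1)) = false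
        have h1 : vs.length = (keys.filter (fun k => PySem.Str.strIsdigit k)).length :=
          pvIntList_some_length _ vs h
        have h2 : (keys.filter (fun k => PySem.Str.strIsdigit k)).length < keys.length :=
          List.length_filter_lt_length_iff_exists.mpr
            ⟨k, hk, by simp only [hnd', Bool.false_eq_true, not_false_eq_true]⟩
        rw [if_pos (by rw [PySem.List.len_eq]
                       exact fun hc => absurd (by exact_mod_cast hc : vs.length = keys.length)
                         (by omega))]
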